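-- pv_equiv track=rewrite | github.com/alpha34/ngram_classifier | src/ngram_classifier_util.py | convert_mekler
-- ===== SOURCE A (Python) =====
-- def convert_mekler(original):
--     types = {'X' : ['M','H','V','Y','N','D','I'],
--              'Y' : ['Q','L','E','K','F'],
--              'Z' : ['W','P','R','G','S','A','T','C'] }
--
--     result=''
--     for t in types.keys():
--         if original in types[t]:
--             result = t
--     if (not result):
--         result = 'U'
--     return result
-- ===== SOURCE B (Python) =====
-- _ORDER = "MHVYNDIQLEKFWPRGSATC"  # X block (7), Y block (5), Z block (8)
--
-- def convert_mekler(original):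
--     i = _ORDER.find(original) if len(original) == 1 else -1
--     if i < 0:
--         return 'U'
--     return 'X' if i < 7 else 'Y' if i < 12 else 'Z'
-- ===== Notes on version B (the rewrite author's own statement) =====
-- stated objective: alternative
-- what changed: Replaced the loop over class lists with membership tests and a last-match accumulator by positional classification: one find() into a single concatenated order string and threshold arithmetic (index<7 -> X, <12 -> Y, else Z) on the resulting index.
import Mathlib
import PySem

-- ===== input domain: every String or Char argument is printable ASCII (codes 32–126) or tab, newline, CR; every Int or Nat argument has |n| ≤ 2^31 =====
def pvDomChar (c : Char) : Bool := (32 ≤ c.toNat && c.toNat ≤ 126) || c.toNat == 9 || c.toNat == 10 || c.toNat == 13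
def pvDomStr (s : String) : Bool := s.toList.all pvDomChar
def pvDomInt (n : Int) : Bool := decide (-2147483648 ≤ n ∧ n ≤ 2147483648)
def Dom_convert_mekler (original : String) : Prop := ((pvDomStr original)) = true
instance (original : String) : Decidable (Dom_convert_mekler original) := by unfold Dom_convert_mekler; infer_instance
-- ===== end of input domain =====

-- B classifies by POSITION: one find() into a single concatenated order string, then threshold
-- arithmetic on the index (i<7 → X, i<12 → Y, else Z), instead of A's loop over class lists.

-- ===== PORT A =====
def convert_mekler (original : String) : String :=
  let types : PySem.Dict String (List String) := PySem.Dict.ofList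
    [("X", ["M", "H", "V", "Y", "N", "D", "I"]),
     ("Y", ["Q", "L", "E", "K", "F"]),
     ("Z", ["W", "P", "R", "G", "S", "A", "T", "C"])]
  let result : String :=
    types.keys.foldl (fun result t =>
      if original ∈ types.getD t [] then t else result) ""
  if result == "" then "U" else result

-- ===== PORT B =====
-- Source B's _ORDER: the three class blocks concatenated, X(7) ++ Y(5) ++ Z(8)
def meklerOrder : String := "MHVYNDIQLEKFWPRGSATC"

def convert_mekler_alt (original : String) : String :=
  let i : Int := if PySem.Str.len original = 1 then PySem.Str.find meklerOrder original else -1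
  if i < 0 then "U"
  else if i < 7 then "X"
  else if i < 12 then "Y"
  else "Z"

-- ===== PRECONDITION & SPEC =====
def Spec_convert_mekler (original : String) (out : String) : Prop := out = convert_mekler_alt original
instance (original : String) (out : String) : Decidable (Spec_convert_mekler original out) := by unfold Spec_convert_mekler; infer_instance

-- ===== CLAIM (what is proved, stated in full; the proofs are below) =====
def Claim_equal_convert_mekler : Prop := ∀ (original : String), Dom_convert_mekler original → Spec_convert_mekler original (convert_mekler original)

-- ===== LEMMAS AND PROOFS =====

theorem typesA_keys : (PySem.Dict.ofList
    [("X", ["M", "H", "V", "Y", "N", "D", "I"]),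
     ("Y", ["Q", "L", "E", "K", "F"]),
     ("Z", ["W", "P", "R", "G", "S", "A", "T", "C"])] : PySem.Dict String (List String)).keys
    = ["X", "Y", "Z"] := by decide

theorem typesA_getX : (PySem.Dict.ofList
    [("X", ["M", "H", "V", "Y", "N", "D", "I"]),
     ("Y", ["Q", "L", "E", "K", "F"]),
     ("Z", ["W", "P", "R", "G", "S", "A", "T", "C"])] : PySem.Dict String (List String)).getD "X" []
    = ["M", "H", "V", "Y", "N", "D", "I"] := by decide

theorem typesA_getY : (PySem.Dict.ofList
    [("X", ["M", "H", "V", "Y", "N", "D", "I"]),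
     ("Y", ["Q", "L", "E", "K", "F"]),
     ("Z", ["W", "P", "R", "G", "S", "A", "T", "C"])] : PySem.Dict String (List String)).getD "Y" []
    = ["Q", "L", "E", "K", "F"] := by decide

theorem typesA_getZ : (PySem.Dict.ofList
    [("X", ["M", "H", "V", "Y", "N", "D", "I"]),
     ("Y", ["Q", "L", "E", "K", "F"]),
     ("Z", ["W", "P", "R", "G", "S", "A", "T", "C"])] : PySem.Dict String (List String)).getD "Z" []
    = ["W", "P", "R", "G", "S", "A", "T", "C"] := by decide

theorem meklerOrder_toList : meklerOrder.toList
    = ['M','H','V','Y','N','D','I','Q','L','E','K','F','W','P','R','G','S','A','T','C'] := by decide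

-- A returns "U" on any string different from all 20 amino-acid letters
theorem convert_mekler_U (original : String)
    (h : original ∉ (["M","H","V","Y","N","D","I","Q","L","E","K","F","W","P","R","G","S","A","T","C"] : List String)) :
    convert_mekler original = "U" := by
  simp only [List.mem_cons, List.not_mem_nil, or_false, not_or] at h
  obtain ⟨h1,h2,h3,h4,h5,h6,h7,h8,h9,h10,h11,h12,h13,h14,h15,h16,h17,h18,h19,h20⟩ := h
  simp only [convert_mekler, typesA_keys, typesA_getX, typesA_getY, typesA_getZ, List.foldl]
  simp [h1, h2, h3, h4, h5, h6, h7, h8, h9, h10,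
        h11, h12, h13, h14, h15, h16, h17, h18, h19, h20]

-- a single-character string whose character is a Mekler letter is one of the 20 letter strings
theorem mem20_of_single (s : String) (c : Char) (hc : s.toList = [c])
    (hmem : c ∈ (['M','H','V','Y','N','D','I','Q','L','E','K','F','W','P','R','G','S','A','T','C'] : List Char)) :
    s ∈ (["M","H","V","Y","N","D","I","Q","L","E","K","F","W","P","R","G","S","A","T","C"] : List String) := by
  fin_cases hmem
  · rw [show s = "M" from String.toList_inj.mp (by rw [hc]; decide)]; decide
  · rw [show s = "H" from String.toList_inj.mp (by rw [hc]; decide)]; decide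
  · rw [show s = "V" from String.toList_inj.mp (by rw [hc]; decide)]; decide
  · rw [show s = "Y" from String.toList_inj.mp (by rw [hc]; decide)]; decide
  · rw [show s = "N" from String.toList_inj.mp (by rw [hc]; decide)]; decide
  · rw [show s = "D" from String.toList_inj.mp (by rw [hc]; decide)]; decide
  · rw [show s = "I" from String.toList_inj.mp (by rw [hc]; decide)]; decide
  · rw [show s = "Q" from String.toList_inj.mp (by rw [hc]; decide)]; decide
  · rw [show s = "L" from String.toList_inj.mp (by rw [hc]; decide)]; decide
  · rw [show s = "E" from String.toList_inj.mp (by rw [hc]; decide)]; decide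
  · rw [show s = "K" from String.toList_inj.mp (by rw [hc]; decide)]; decide
  · rw [show s = "F" from String.toList_inj.mp (by rw [hc]; decide)]; decide
  · rw [show s = "W" from String.toList_inj.mp (by rw [hc]; decide)]; decide
  · rw [show s = "P" from String.toList_inj.mp (by rw [hc]; decide)]; decide
  · rw [show s = "R" from String.toList_inj.mp (by rw [hc]; decide)]; decide
  · rw [show s = "G" from String.toList_inj.mp (by rw [hc]; decide)]; decide
  · rw [show s = "S" from String.toList_inj.mp (by rw [hc]; decide)]; decide
  · rw [show s = "A" from String.toList_inj.mp (by rw [hc]; decide)]; decide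
  · rw [show s = "T" from String.toList_inj.mp (by rw [hc]; decide)]; decide
  · rw [show s = "C" from String.toList_inj.mp (by rw [hc]; decide)]; decide

-- B returns "U" on any string different from all 20 amino-acid letters
theorem convert_mekler_alt_U (original : String)
    (h : original ∉ (["M","H","V","Y","N","D","I","Q","L","E","K","F","W","P","R","G","S","A","T","C"] : List String)) :
    convert_mekler_alt original = "U" := by
  unfold convert_mekler_alt
  by_cases hl : original.length = 1
  · have hfind : PySem.Chars.find meklerOrder.toList original.toList = -1 := by
      rw [PySem.Chars.find_eq_neg_one_iff]
      intro hin
      have hlen : original.toList.length = 1 := by rw [String.length_toList]; exact hl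
      obtain ⟨c, hc⟩ := List.length_eq_one_iff.mp hlen
      rw [hc] at hin
      have hmem : c ∈ meklerOrder.toList := List.singleton_sublist.mp hin.sublist
      rw [meklerOrder_toList] at hmem
      exact h (mem20_of_single original c hc hmem)
    simp [PySem.Str.len, hl, hfind]
  · simp [PySem.Str.len, hl]

-- ===== VERDICT (by name: the statement is the Claim_ definition above) =====
theorem convert_mekler_spec : Claim_equal_convert_mekler := by
  intro original _
  unfold Spec_convert_mekler
  by_cases h : original ∈ (["M","H","V","Y","N","D","I","Q","L","E","K","F","W","P","R","G","S","A","T","C"] : List String)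
  · fin_cases h <;> decide
  · rw [convert_mekler_U original h, convert_mekler_alt_U original h]
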